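-- pv_equiv track=rewrite | github.com/TheDarkLightX/Formal_Methods_Philosophy | experiments/math_object_innovation_v90/run_cycle.py | minimal_covers
-- ===== SOURCE A (Python) =====
-- from itertools import combinations, product
--
-- def minimal_covers(options, target_mask, max_size=6):
--     answers = []
--     for size in range(1, max_size + 1):
--         for combo in combinations(range(len(options)), size):
--             union = 0
--             formulas = []
--             for index in combo:
--                 union |= options[index][1]
--                 formulas.append(options[index][0])
--             if union == target_mask:
--                 answers.append(tuple(formulas))
--         if answers:
--             return sorted(set(answers))
--     return []
-- ===== SOURCE B (Python) =====
-- def minimal_covers(options, target_mask, max_size=6):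
--     # Iterative-deepening backtracking over option indices, threading the
--     # running union; the target is tested only at the leaves.
--     n = len(options)
--
--     def extend(start, union, depth):
--         if depth == 0:
--             return [()] if union == target_mask else []
--         if depth > n - start:
--             return []
--         res = []
--         for i in range(start, n):
--             name, mask = options[i]
--             for tail in extend(i + 1, union | mask, depth - 1):
--                 res.append((name,) + tail)
--         return res
--
--     for depth in range(1, max_size + 1):
--         found = extend(0, 0, depth)
--         if found:
--             return sorted(set(found))
--     return []
-- ===== Notes on version B (the rewrite author's own statement) =====
-- stated objective: alternative
-- what changed: Replaced the size-then-itertools.combinations enumeration with per-combo union recomputation by an iterative-deepening include/exclude backtracking recursion that threads the running union incrementally and tests the target only at the leaves.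
import Mathlib
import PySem

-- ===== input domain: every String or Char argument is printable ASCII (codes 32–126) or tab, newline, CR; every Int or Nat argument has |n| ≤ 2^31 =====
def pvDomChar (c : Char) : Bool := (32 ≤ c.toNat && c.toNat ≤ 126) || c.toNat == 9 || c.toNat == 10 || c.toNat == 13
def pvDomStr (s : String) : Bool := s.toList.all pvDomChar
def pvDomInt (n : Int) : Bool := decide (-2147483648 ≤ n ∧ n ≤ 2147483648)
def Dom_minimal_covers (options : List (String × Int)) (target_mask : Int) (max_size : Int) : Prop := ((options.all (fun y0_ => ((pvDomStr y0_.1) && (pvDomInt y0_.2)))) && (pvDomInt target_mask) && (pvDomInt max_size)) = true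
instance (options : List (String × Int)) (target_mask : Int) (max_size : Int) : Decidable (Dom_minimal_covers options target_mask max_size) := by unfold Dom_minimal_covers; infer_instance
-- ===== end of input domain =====

-- B replaces the size-then-itertools.combinations scan by an iterative-deepening
-- include/exclude backtracking recursion that threads the running union (objective: alternative).

-- ===== PORT A =====
-- inner 'for index in combo' loop of A: accumulates (union, formulas)
def pvA_comboFold (options : List (String × Int)) (combo : List Int) : Int × List String :=
  combo.foldl (fun st index =>
    (PySem.Int.bor st.1 (PySem.List.pyGetD options index ("", 0)).2,
     st.2 ++ [(PySem.List.pyGetD options index ("", 0)).1])) (0, [])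

-- outer 'for size in range(1, max_size + 1)' loop (range kept lazy: counter recursion) with the accumulated answers
def pvA_loop (options : List (String × Int)) (target_mask : Int) (answers : List (List String)) (size stop : Int) : List (List String) :=
  if size < stop then
    let answers' := (PySem.List.combinations (PySem.List.pyRange 0 (options.length : Int) 1) size.toNat).foldl
      (fun acc combo =>
        let st := pvA_comboFold options combo
        if st.1 == target_mask then acc ++ [st.2] else acc) answers
    if answers' = [] then pvA_loop options target_mask answers' (size + 1) stop
    else PySem.List.sorted (PySem.Set.ofList answers') (fun x => x) false
  else []
  termination_by (stop - size).toNat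
  decreasing_by omega

def minimal_covers (options : List (String × Int)) (target_mask : Int) (max_size : Int) : List (List String) :=
  pvA_loop options target_mask [] 1 (max_size + 1)

-- ===== PORT B =====
-- extend(start, union, depth) of Source B: pick the next option index i >= start, union threaded along
def pvB_extend (options : List (String × Int)) (target_mask : Int) (n : Int) (start : Int) (union : Int) : Nat → List (List String)
  | 0 => if union == target_mask then [[]] else []
  | depth + 1 =>
      if n - start < (depth : Int) + 1 then []
      else (PySem.List.pyRange start n 1).foldl
        (fun res i =>
          let nm := PySem.List.pyGetD options i ("", 0)
          res ++ (pvB_extend options target_mask n (i + 1) (PySem.Int.bor union nm.2) depth).map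
              (fun tail => nm.1 :: tail))
        []

-- 'for depth in range(1, max_size + 1)' driver of Source B (range kept lazy: counter recursion)
def pvB_loop (options : List (String × Int)) (target_mask : Int) (depth stop : Int) : List (List String) :=
  if depth < stop then
    let found := pvB_extend options target_mask (options.length : Int) 0 0 depth.toNat
    if found = [] then pvB_loop options target_mask (depth + 1) stop
    else PySem.List.sorted (PySem.Set.ofList found) (fun x => x) false
  else []
  termination_by (stop - depth).toNat
  decreasing_by omega

def minimal_covers_alt (options : List (String × Int)) (target_mask : Int) (max_size : Int) : List (List String) :=
  pvB_loop options target_mask 1 (max_size + 1)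

-- ===== PRECONDITION & SPEC =====
def Spec_minimal_covers (options : List (String × Int)) (target_mask : Int) (max_size : Int) (out : List (List String)) : Prop := out = minimal_covers_alt options target_mask max_size
instance (options : List (String × Int)) (target_mask : Int) (max_size : Int) (out : List (List String)) : Decidable (Spec_minimal_covers options target_mask max_size out) := by unfold Spec_minimal_covers; infer_instance

-- ===== CLAIM (what is proved, stated in full; the proofs are below) =====
def Claim_equal_minimal_covers : Prop := ∀ (options : List (String × Int)) (target_mask : Int) (max_size : Int), Dom_minimal_covers options target_mask max_size → Spec_minimal_covers options target_mask max_size (minimal_covers options target_mask max_size)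

-- ===== LEMMAS AND PROOFS =====

-- one backtracking branch: choose index i, then all completions of the remaining depth
def pvG (options : List (String × Int)) (t n : Int) (d : Nat) (u : Int) (i : Int) : List (List String) :=
  (pvB_extend options t n (i + 1) (PySem.Int.bor u (PySem.List.pyGetD options i ("", 0)).2) d).map
    (fun tail => (PySem.List.pyGetD options i ("", 0)).1 :: tail)

theorem pvB_extend_succ (options : List (String × Int)) (t n start u : Int) (d : Nat)
    (hng : ¬ n - start < (d : Int) + 1) :
    pvB_extend options t n start u (d + 1) = (PySem.List.pyRange start n 1).flatMap (pvG options t n d u) := by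
  have hbody : (fun (res : List (List String)) (i : Int) =>
      let nm := PySem.List.pyGetD options i ("", 0)
      res ++ (pvB_extend options t n (i + 1) (PySem.Int.bor u nm.2) d).map (fun tail => nm.1 :: tail))
      = (fun res i => res ++ pvG options t n d u i) := rfl
  rw [pvB_extend, if_neg hng, hbody, PySem.List.foldl_append_eq_flatMap, List.nil_append]

theorem pvGet_eq (options : List (String × Int)) {j : Nat} (hj : j < options.length) :
    PySem.List.pyGetD options (j : Int) ("", 0) = options[j] := by
  rw [PySem.List.pyGetD_natCast]
  simp [List.getD_eq_getElem?_getD, List.getElem?_eq_getElem hj]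

-- B's extend from position j is the filtered-and-projected combination list of the j-th tail
theorem pvB_extend_eq (options : List (String × Int)) (t : Int) :
    ∀ (d j : Nat) (u : Int),
      pvB_extend options t (options.length : Int) (j : Int) u d =
        ((PySem.List.combinations (options.drop j) d).filter
          (fun c => (c.foldl (fun a x => PySem.Int.bor a x.2) u) == t)).map
          (fun c => c.map Prod.fst) := by
  intro d
  induction d with
  | zero =>
    intro j u
    simp only [pvB_extend, PySem.List.combinations_zero, List.filter, List.foldl_nil]
    cases hb : (u == t) <;> simp_all
  | succ d ihd =>
    suffices h : ∀ (k j : Nat), options.length - j = k → ∀ (u : Int),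
        (PySem.List.pyRange (j : Int) (options.length : Int) 1).flatMap
            (pvG options t (options.length : Int) d u)
          = ((PySem.List.combinations (options.drop j) (d + 1)).filter
              (fun c => (c.foldl (fun a x => PySem.Int.bor a x.2) u) == t)).map
              (fun c => c.map Prod.fst) by
      intro j u
      by_cases hg : (options.length : Int) - (j : Int) < (d : Int) + 1
      · rw [pvB_extend, if_pos hg]
        have hlen : (options.drop j).length < d + 1 := by
          rw [List.length_drop]; omega
        rw [PySem.List.combinations_eq_nil_of_length_lt (options.drop j) hlen]
        simp
      · rw [pvB_extend_succ options t _ _ u d hg]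
        exact h _ j rfl u
    intro k
    induction k with
    | zero =>
      intro j hk u
      have hj : options.length ≤ j := by omega
      rw [PySem.List.pyRange_one]
      simp [show (((options.length : Int)) - (j : Int)).toNat = 0 from by omega,
        List.drop_eq_nil_of_le hj, PySem.List.combinations_nil_succ]
    | succ k ihk =>
      intro j hk u
      have hj : j < options.length := by omega
      have hcast : ((j : Int)) + 1 = ((j + 1 : Nat) : Int) := by push_cast; ring
      rw [PySem.List.pyRange_one_cons (by exact_mod_cast hj), List.flatMap_cons, hcast,
        ihk (j + 1) (by omega) u]
      have hdrop : options.drop j = options[j] :: options.drop (j + 1) :=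
        (List.getElem_cons_drop hj).symm
      rw [hdrop, PySem.List.combinations_cons_succ]
      simp only [pvG, hcast, ihd (j + 1), pvGet_eq options hj, List.filter_append,
        List.map_append, List.filter_map, List.map_map]
      simp [Function.comp_def]

-- A's inner loop computed in components
-- A's inner loop computed in components
theorem pvA_comboFold_eq (options : List (String × Int)) (combo : List Int) :
  pvA_comboFold options combo =
    (combo.foldl (fun a i => PySem.Int.bor a (PySem.List.pyGetD options i ("", 0)).2) 0,
     combo.map (fun i => (PySem.List.pyGetD options i ("", 0)).1)) := by
  unfold pvA_comboFold
  rw [PySem.List.foldl_prod_mk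
      (f := fun a i => PySem.Int.bor a (PySem.List.pyGetD options i ("", 0)).2)
      (g := fun fs i => fs ++ [(PySem.List.pyGetD options i ("", 0)).1]),
    PySem.List.foldl_append_singleton_eq_map]
  simp

theorem pv_options_eq_map_range (options : List (String × Int)) :
  options = (List.range options.length).map (fun k => options.getD k ("", 0)) := by
  apply List.ext_getElem
  · simp
  · intro i p _; simp [List.getD_eq_getElem?_getD, List.getElem?_eq_getElem p]

-- A's per-size answer list is B's extend at that depth
theorem pv_size_eq (options : List (String × Int)) (t : Int) (s : Nat) :
  (PySem.List.combinations (PySem.List.pyRange 0 (options.length : Int) 1) s).foldl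
    (fun acc combo =>
      let st := pvA_comboFold options combo
      if st.1 == t then acc ++ [st.2] else acc) []
  = pvB_extend options t (options.length : Int) 0 0 s := by
  rw [PySem.List.foldl_append_if
      (p := fun combo => (pvA_comboFold options combo).1 == t)
      (f := fun combo => (pvA_comboFold options combo).2)]
  have h0 := pvB_extend_eq options t s 0 0
  rw [show (((0 : Nat)) : Int) = (0 : Int) from rfl] at h0
  rw [h0, List.drop_zero]
  conv_rhs => rw [pv_options_eq_map_range options]
  rw [PySem.List.pyRange_zero_natCast, PySem.List.combinations_map, PySem.List.combinations_map,
    List.filter_map, List.filter_map, List.map_map, List.map_map]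
  simp [Function.comp_def, pvA_comboFold_eq, List.foldl_map, List.map_map,
    PySem.List.pyGetD_natCast]

-- the two size loops agree when A's accumulator is empty
theorem pv_loops_eq (options : List (String × Int)) (t : Int) :
    ∀ (n : Nat) (size stop : Int), (stop - size).toNat ≤ n →
      pvA_loop options t [] size stop = pvB_loop options t size stop := by
  intro n
  induction n with
  | zero =>
    intro size stop h
    rw [pvA_loop, pvB_loop]
    have : ¬ size < stop := by omega
    simp [this]
  | succ n ih =>
    intro size stop h
    rw [pvA_loop, pvB_loop]
    by_cases hlt : size < stop
    · simp only [hlt, if_true]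
      rw [pv_size_eq options t size.toNat]
      by_cases he : pvB_extend options t (options.length : Int) 0 0 size.toNat = []
      · simp only [he, if_true]
        exact ih (size + 1) stop (by omega)
      · simp [he]
    · simp [hlt]

-- ===== VERDICT (by name: the statement is the Claim_ definition above) =====
theorem minimal_covers_spec : Claim_equal_minimal_covers := by
  intro options target_mask max_size _
  unfold Spec_minimal_covers minimal_covers minimal_covers_alt
  exact pv_loops_eq options target_mask (max_size + 1 - 1).toNat 1 (max_size + 1) (by omega)
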